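-- pv_equiv track=rewrite | github.com/heohak/python | EXAM/exam0/exam.py | rainbows
-- ===== SOURCE A (Python) =====
-- def rainbows(field: str, lower=False) -> int:
--     """
--     Count rainbows.
--
--     #5
--
--     Function has to be recursive.
--
--     assert rainbows("rainbowThisIsJustSomeNoise") == 1  # Lisaks vikerkaarele on veel sümboleid
--     assert rainbows("WoBniar") == 1  # Vikerkaar on tagurpidi ja sisaldab suuri tähti
--     assert rainbows("rainbowobniar") == 1  # Kaks vikerkaart jagavad tähte seega üks neist ei ole valiidne
--
--     :param field: string to search rainbows from
--     :return: number of rainbows in the string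
--     """
--     field = field.lower()
--     if len(field) < 7:
--         return 0
--
--     if field[0] == "r":
--         if len(field) >= 7 and field[1:7] == "ainbow":
--             return 1 + rainbows(field[7:])
--         else:
--             return rainbows(field[1:])
--     elif field[0] == "w":
--         if len(field) >= 7 and field[1:7] == "obniar":
--             return 1 + rainbows(field[7:])
--         else:
--             return rainbows(field[1:])
--     else:
--         return rainbows(field[1:])
-- ===== SOURCE B (Python) =====
-- def rainbows(field: str, lower=False) -> int:
--     """Count non-overlapping 'rainbow'/'wobniar' substrings, case-insensitively.
--
--     Single left-to-right index scan over the string lowered once: no slicing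
--     recursion, advance 7 past a match, else 1.
--     """
--     s = field.lower()
--     n = len(s)
--     count = 0
--     i = 0
--     while i + 7 <= n:
--         if s[i:i + 7] in ("rainbow", "wobniar"):
--             count += 1
--             i += 7
--         else:
--             i += 1
--     return count
-- ===== Notes on version B (the rewrite author's own statement) =====
-- stated objective: faster
-- what changed: Replaces A's recursion that re-lowercases and copies a fresh string slice at every position with a single lowercasing followed by one iterative index scan that advances 7 on a match and 1 otherwise.
import Mathlib
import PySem

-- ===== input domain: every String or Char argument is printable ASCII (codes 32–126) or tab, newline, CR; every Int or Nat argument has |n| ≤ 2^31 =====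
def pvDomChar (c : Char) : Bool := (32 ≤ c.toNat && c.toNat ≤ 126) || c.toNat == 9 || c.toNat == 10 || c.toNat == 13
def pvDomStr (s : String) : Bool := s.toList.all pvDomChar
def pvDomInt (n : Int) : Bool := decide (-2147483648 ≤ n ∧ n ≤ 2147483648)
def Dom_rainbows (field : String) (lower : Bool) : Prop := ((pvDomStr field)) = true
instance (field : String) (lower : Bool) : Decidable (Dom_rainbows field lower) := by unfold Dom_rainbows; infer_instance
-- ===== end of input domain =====

-- B replaces A's slice-copying recursion by one lowercasing plus a single iterative index scan (objective: faster).


-- ===== PORT A =====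
-- A's recursion, transliterated on the code-point list: lower the field, then
-- branch on the first character and the slice [1:7], recursing on a slice.
def rainbowsListA (s : List Char) : Int :=
  let f := PySem.Chars.lower s
  if f.length < 7 then 0
  else if PySem.List.pyGet? f 0 = some 'r' then
    (if 7 ≤ f.length ∧ PySem.List.slice f (some 1) (some 7) = "ainbow".toList then
      1 + rainbowsListA (PySem.List.slice f (some 7) none)
    else rainbowsListA (PySem.List.slice f (some 1) none))
  else if PySem.List.pyGet? f 0 = some 'w' then
    (if 7 ≤ f.length ∧ PySem.List.slice f (some 1) (some 7) = "obniar".toList then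
      1 + rainbowsListA (PySem.List.slice f (some 7) none)
    else rainbowsListA (PySem.List.slice f (some 1) none))
  else rainbowsListA (PySem.List.slice f (some 1) none)
termination_by s.length
decreasing_by
  all_goals
    (have hfl : (PySem.Chars.lower s).length = s.length := by
       simp [PySem.Chars.lower]
     have h7 : ¬ (PySem.Chars.lower s).length < 7 := by assumption
     rw [hfl] at h7
     first
       | rw [PySem.List.slice_from _ (show (0:Int) ≤ 7 by omega)]
       | rw [PySem.List.slice_from _ (show (0:Int) ≤ 1 by omega)]
     simp only [List.length_drop, hfl]
     omega)

def rainbows (field : String) (lower : Bool) : Int := rainbowsListA field.toList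

-- ===== PORT B =====
-- B's while-loop: s is lowered once, i scans left to right, slice s[i:i+7]
-- is compared with the two words; advance 7 on a match, else 1.
def rainbowsAltLoop (s : List Char) (n : Int) (i : Int) (count : Int) : Int :=
  if i + 7 ≤ n then
    (if PySem.List.slice s (some i) (some (i + 7)) = "rainbow".toList ∨
        PySem.List.slice s (some i) (some (i + 7)) = "wobniar".toList then
      rainbowsAltLoop s n (i + 7) (count + 1)
    else rainbowsAltLoop s n (i + 1) count)
  else count
termination_by (n - i).toNat
decreasing_by all_goals omega

def rainbows_alt (field : String) (lower : Bool) : Int :=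
  let s := PySem.Chars.lower field.toList
  rainbowsAltLoop s (s.length : Int) 0 0

-- ===== PRECONDITION & SPEC =====
def Spec_rainbows (field : String) (lower : Bool) (out : Int) : Prop := out = rainbows_alt field lower
instance (field : String) (lower : Bool) (out : Int) : Decidable (Spec_rainbows field lower out) := by unfold Spec_rainbows; infer_instance

-- ===== CLAIM (what is proved, stated in full; the proofs are below) =====
def Claim_equal_rainbows : Prop := ∀ (field : String) (lower : Bool), Dom_rainbows field lower → Spec_rainbows field lower (rainbows field lower)

-- ===== LEMMAS AND PROOFS =====

-- canonical count: greedy leftmost non-overlapping occurrences on an already-lowered list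
def cnt : List Char → Int
  | [] => 0
  | c :: t =>
    if "rainbow".toList <+: (c :: t) ∨ "wobniar".toList <+: (c :: t) then
      1 + cnt (t.drop 6)
    else cnt t
termination_by s => s.length
decreasing_by all_goals (simp only [List.length_drop, List.length_cons]; omega)

lemma lowerChar_idem (c : Char) :
    PySem.Chars.lowerChar (PySem.Chars.lowerChar c) = PySem.Chars.lowerChar c := by
  simp only [PySem.Chars.lowerChar, PySem.Chars.isupper]
  by_cases h1 : 'A' ≤ c
  · by_cases h2 : c ≤ 'Z'
    · have h65 : 65 ≤ c.toNat := h1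
      have h90 : c.toNat ≤ 90 := h2
      have hv : (c.toNat + 32).isValidChar := Or.inl (by omega)
      have ht : (Char.ofNat (c.toNat + 32)).toNat = c.toNat + 32 := by
        rw [Char.toNat_ofNat, if_pos hv]
      have hno : ¬ (Char.ofNat (c.toNat + 32) ≤ 'Z') := by
        intro hle
        have h2' : (Char.ofNat (c.toNat + 32)).toNat ≤ 90 := hle
        omega
      simp [h1, h2, hno]
    · simp [h2]
  · simp [h1]

lemma lower_idem (s : List Char) :
    PySem.Chars.lower (PySem.Chars.lower s) = PySem.Chars.lower s := by
  simp [PySem.Chars.lower, Function.comp_def, lowerChar_idem]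

lemma lower_length (s : List Char) : (PySem.Chars.lower s).length = s.length := by
  simp [PySem.Chars.lower]

lemma lower_drop (s : List Char) (n : Nat) :
    PySem.Chars.lower (s.drop n) = (PySem.Chars.lower s).drop n := by
  simp [PySem.Chars.lower, List.map_drop]

lemma rainbow_cons : "rainbow".toList = 'r' :: "ainbow".toList := by decide
lemma wobniar_cons : "wobniar".toList = 'w' :: "obniar".toList := by decide

lemma cnt_short : ∀ (k : Nat) (s : List Char), s.length ≤ k → s.length < 7 → cnt s = 0 := by
  intro k
  induction k with
  | zero =>
    intro s hle _
    have : s = [] := List.eq_nil_of_length_eq_zero (Nat.le_zero.mp hle)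
    subst this; simp only [cnt]
  | succ k ih =>
    intro s hle h
    cases s with
    | nil => simp only [cnt]
    | cons c t =>
      have hn : ¬ ("rainbow".toList <+: (c :: t) ∨ "wobniar".toList <+: (c :: t)) := by
        rintro (hp | hp) <;>
          (have := hp.length_le; simp at this h; omega)
      rw [show cnt (c :: t) = cnt t from by simp only [cnt, if_neg hn]]
      exact ih t (by simp at hle; omega) (by simp at h ⊢; omega)

lemma prefix_iff_take7 (w d : List Char) (hw : w.length = 7) :
    w <+: d ↔ d.take 7 = w := by
  rw [List.prefix_iff_eq_take, hw, eq_comm]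

lemma cnt_cons_match (c : Char) (t : List Char)
    (h : "rainbow".toList <+: (c :: t) ∨ "wobniar".toList <+: (c :: t)) :
    cnt (c :: t) = 1 + cnt (t.drop 6) := by
  simp only [cnt, if_pos h]

lemma cnt_cons_nomatch (c : Char) (t : List Char)
    (h : ¬ ("rainbow".toList <+: (c :: t) ∨ "wobniar".toList <+: (c :: t))) :
    cnt (c :: t) = cnt t := by
  simp only [cnt, if_neg h]

lemma A_eq_cnt : ∀ (k : Nat) (s : List Char), s.length ≤ k →
    rainbowsListA s = cnt (PySem.Chars.lower s) := by
  intro k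
  induction k with
  | zero =>
    intro s hle
    have hs : s = [] := List.eq_nil_of_length_eq_zero (Nat.le_zero.mp hle)
    subst hs
    rw [rainbowsListA.eq_def]
    simp [PySem.Chars.lower, cnt]
  | succ k ih =>
    intro s hle
    rw [rainbowsListA.eq_def]
    simp only []
    by_cases h7 : (PySem.Chars.lower s).length < 7
    · rw [if_pos h7, cnt_short (k+1) _ (by rw [lower_length]; omega) h7]
    · rw [if_neg h7]
      set f := PySem.Chars.lower s with hf
      obtain ⟨c, t, hct⟩ : ∃ c t, f = c :: t := by
        cases hfe : f with
        | nil => exfalso; rw [hfe] at h7; simp at h7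
        | cons c t => exact ⟨c, t, rfl⟩
      have hlen : f.length = s.length := by rw [hf, lower_length]
      have hlow : PySem.Chars.lower f = f := by rw [hf]; exact lower_idem s
      have hhead : PySem.List.pyGet? f 0 = some c := by
        rw [hct, show (0:Int) = ((0:Nat):Int) from rfl, PySem.List.pyGet?_natCast]
        rfl
      have h1c : (1 : Int).toNat = 1 := by omega
      have h7c : (7 : Int).toNat = 7 := by omega
      have hs17 : PySem.List.slice f (some 1) (some 7) = t.take 6 := by
        rw [PySem.List.slice_toNat _ (by omega) (by omega), h1c, h7c, hct]
        rfl
      have hs7 : PySem.List.slice f (some 7) none = t.drop 6 := by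
        rw [PySem.List.slice_from _ (show (0:Int) ≤ 7 by omega), h7c, hct]
        rfl
      have hs1 : PySem.List.slice f (some 1) none = t := by
        rw [PySem.List.slice_from _ (show (0:Int) ≤ 1 by omega), h1c, hct]
        rfl
      have htlen : t.length + 1 = s.length := by
        rw [← hlen, hct]; simp
      have ih7 : rainbowsListA (t.drop 6) = cnt (t.drop 6) := by
        have hd : t.drop 6 = f.drop 7 := by rw [hct]; rfl
        rw [ih _ (by simp [List.length_drop]; omega), hd, lower_drop, hlow]
      have ih1 : rainbowsListA t = cnt t := by
        have hd : t = f.drop 1 := by rw [hct]; rfl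
        rw [ih _ (by omega), hd, lower_drop, hlow]
      have hRpre : ("rainbow".toList <+: (c :: t)) ↔ (c = 'r' ∧ t.take 6 = "ainbow".toList) := by
        rw [rainbow_cons, List.cons_prefix_cons, List.prefix_iff_eq_take,
            show ("ainbow".toList).length = 6 from by decide, eq_comm (a := 'r'),
            eq_comm (a := "ainbow".toList)]
      have hWpre : ("wobniar".toList <+: (c :: t)) ↔ (c = 'w' ∧ t.take 6 = "obniar".toList) := by
        rw [wobniar_cons, List.cons_prefix_cons, List.prefix_iff_eq_take,
            show ("obniar".toList).length = 6 from by decide, eq_comm (a := 'w'),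
            eq_comm (a := "obniar".toList)]
      rw [hhead, hs17, hs7, hs1]
      by_cases hr : c = 'r'
      · rw [if_pos (by rw [hr])]
        by_cases hm : t.take 6 = "ainbow".toList
        · rw [if_pos ⟨by omega, hm⟩, hct,
              cnt_cons_match c t (Or.inl (hRpre.mpr ⟨hr, hm⟩)), ih7]
        · rw [if_neg (by rintro ⟨-, h⟩; exact hm h), hct,
              cnt_cons_nomatch c t (by
                rintro (hp | hp)
                · exact hm (hRpre.mp hp).2
                · have := (hWpre.mp hp).1; rw [hr] at this; exact absurd this (by decide)),
              ih1]
      · rw [if_neg (by simp [hr])]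
        by_cases hw : c = 'w'
        · rw [if_pos (by rw [hw])]
          by_cases hm : t.take 6 = "obniar".toList
          · rw [if_pos ⟨by omega, hm⟩, hct,
                cnt_cons_match c t (Or.inr (hWpre.mpr ⟨hw, hm⟩)), ih7]
          · rw [if_neg (by rintro ⟨-, h⟩; exact hm h), hct,
                cnt_cons_nomatch c t (by
                  rintro (hp | hp)
                  · exact hr (hRpre.mp hp).1
                  · exact hm (hWpre.mp hp).2),
                ih1]
        · rw [if_neg (by simp [hw]), hct,
              cnt_cons_nomatch c t (by
                rintro (hp | hp)
                · exact hr (hRpre.mp hp).1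
                · exact hw (hWpre.mp hp).1),
              ih1]

lemma alt_eq_cnt : ∀ (k : Nat) (s : List Char) (i count : Int), 0 ≤ i →
    ((s.length : Int) - i).toNat ≤ k →
    rainbowsAltLoop s (s.length : Int) i count = count + cnt (s.drop i.toNat) := by
  intro k
  induction k with
  | zero =>
    intro s i count h0 hk
    rw [rainbowsAltLoop.eq_def, if_neg (by omega),
        cnt_short (s.drop i.toNat).length _ le_rfl (by simp; omega)]
    omega
  | succ k ih =>
    intro s i count h0 hk
    rw [rainbowsAltLoop.eq_def]
    by_cases hc : i + 7 ≤ (s.length : Int)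
    · rw [if_pos hc]
      have hslice : PySem.List.slice s (some i) (some (i + 7)) = (s.drop i.toNat).take 7 := by
        rw [PySem.List.slice_toNat _ h0 (by omega)]
        congr 1; omega
      obtain ⟨c, t, hct⟩ : ∃ c t, s.drop i.toNat = c :: t := by
        cases hfe : s.drop i.toNat with
        | nil => exfalso; have := congrArg List.length hfe; simp at this; omega
        | cons c t => exact ⟨c, t, rfl⟩
      have hdlen : (s.drop i.toNat).length = s.length - i.toNat := by simp
      have hstep7 : s.drop (i + 7).toNat = t.drop 6 := by
        have hdd : (s.drop i.toNat).drop 7 = s.drop (i + 7).toNat := by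
          rw [List.drop_drop]; congr 1; omega
        rw [← hdd, hct]; rfl
      have hstep1 : s.drop (i + 1).toNat = t := by
        have hdd : (s.drop i.toNat).drop 1 = s.drop (i + 1).toNat := by
          rw [List.drop_drop]; congr 1; omega
        rw [← hdd, hct]; rfl
      rw [hslice]
      by_cases hm : (s.drop i.toNat).take 7 = "rainbow".toList ∨
          (s.drop i.toNat).take 7 = "wobniar".toList
      · rw [if_pos hm, ih s (i + 7) (count + 1) (by omega) (by omega), hstep7, hct,
            cnt_cons_match c t (by
              rcases hm with hm | hm
              · exact Or.inl (hct ▸ (prefix_iff_take7 _ _ (by decide)).mpr hm)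
              · exact Or.inr (hct ▸ (prefix_iff_take7 _ _ (by decide)).mpr hm))]
        ring
      · rw [if_neg hm, ih s (i + 1) count (by omega) (by omega), hstep1, hct,
            cnt_cons_nomatch c t (by
              rintro (hp | hp)
              · exact hm (Or.inl ((prefix_iff_take7 _ _ (by decide)).mp (hct ▸ hp)))
              · exact hm (Or.inr ((prefix_iff_take7 _ _ (by decide)).mp (hct ▸ hp))))]
    · rw [if_neg hc,
          cnt_short (s.drop i.toNat).length _ le_rfl (by simp; omega)]
      omega

-- ===== VERDICT (by name: the statement is the Claim_ definition above) =====
theorem rainbows_spec : Claim_equal_rainbows := by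
  intro field lower _
  unfold Spec_rainbows rainbows rainbows_alt
  rw [A_eq_cnt field.toList.length field.toList le_rfl]
  simp only []
  rw [alt_eq_cnt (PySem.Chars.lower field.toList).length (PySem.Chars.lower field.toList) 0 0
        le_rfl (by omega)]
  simp
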